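-- pv_equiv track=rewrite | github.com/elzawie/Inshorts_NLP | helper.py | describe_string
-- ===== SOURCE A (Python) =====
-- def describe_string(string):
--     letters_count = 0
--     digits_count = 0
--     symbols_count = 0
--     length = len(string)
--     istitle = string.istitle()
--     for character in string:
--         if character.isalpha():
--             letters_count += 1
--         elif character.isnumeric():
--             digits_count += 1
--         else:
--             symbols_count += 1
--     return(letters_count, digits_count, symbols_count, length, istitle)
-- ===== SOURCE B (Python) =====
-- def describe_string(string):
--     letters_count = sum(1 for c in string if c.isalpha())
--     digits_count = sum(1 for c in string if c.isnumeric() and not c.isalpha())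
--     return (letters_count, digits_count,
--             len(string) - letters_count - digits_count,
--             len(string), string.istitle())
-- ===== Notes on version B (the rewrite author's own statement) =====
-- stated objective: alternative
-- what changed: Replaces the single three-way-branching counting loop with two independent filtering passes (letters, digits) and derives the symbols count by subtraction from the length.
import Mathlib
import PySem

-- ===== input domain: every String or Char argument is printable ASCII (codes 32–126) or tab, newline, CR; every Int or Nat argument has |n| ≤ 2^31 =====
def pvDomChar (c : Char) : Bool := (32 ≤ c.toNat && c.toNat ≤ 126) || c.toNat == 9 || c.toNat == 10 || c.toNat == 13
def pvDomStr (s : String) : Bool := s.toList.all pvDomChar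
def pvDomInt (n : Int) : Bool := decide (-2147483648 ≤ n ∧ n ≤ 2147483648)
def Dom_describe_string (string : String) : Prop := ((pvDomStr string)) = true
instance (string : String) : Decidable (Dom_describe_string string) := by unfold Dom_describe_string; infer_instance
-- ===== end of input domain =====

-- B replaces the single three-way-branching counting loop with two filtering passes
-- (letters, digits) and derives the symbols count by subtraction from the length (alternative decomposition, same cost).

-- shared helper: str.istitle(), ported by hand (PySem has no istitle); exact on the ASCII domain,
-- where the cased characters are exactly the letters: state = (previous char was cased, a cased char was seen).
def pyIstitle : List Char → Bool → Bool → Bool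
  | [], _, found => found
  | c :: rest, prevCased, found =>
    if PySem.Chars.isupper c then
      if prevCased then false else pyIstitle rest true true
    else if PySem.Chars.islower c then
      if prevCased then pyIstitle rest true true else false
    else pyIstitle rest false found

-- ===== PORT A =====
-- single fold over the characters, three-way branch (isnumeric = isdigit on the ASCII domain)
def describe_string (string : String) : Int × Int × Int × Int × Bool :=
  let counts := string.toList.foldl
    (fun (st : Int × Int × Int) c =>
      if PySem.Chars.isalpha c then (st.1 + 1, st.2.1, st.2.2)
      else if PySem.Chars.isdigit c then (st.1, st.2.1 + 1, st.2.2)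
      else (st.1, st.2.1, st.2.2 + 1))
    (0, 0, 0)
  (counts.1, counts.2.1, counts.2.2, PySem.Str.len string, pyIstitle string.toList false false)

-- ===== PORT B =====
def describe_string_alt (string : String) : Int × Int × Int × Int × Bool :=
  let letters_count : Int := ((string.toList.filter (fun c => PySem.Chars.isalpha c)).length : Int)
  let digits_count : Int := ((string.toList.filter (fun c => PySem.Chars.isdigit c && !PySem.Chars.isalpha c)).length : Int)
  (letters_count, digits_count,
    PySem.Str.len string - letters_count - digits_count,
    PySem.Str.len string, pyIstitle string.toList false false)

-- ===== PRECONDITION & SPEC =====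
def Spec_describe_string (string : String) (out : Int × Int × Int × Int × Bool) : Prop := out = describe_string_alt string
instance (string : String) (out : Int × Int × Int × Int × Bool) : Decidable (Spec_describe_string string out) := by unfold Spec_describe_string; infer_instance

-- ===== CLAIM (what is proved, stated in full; the proofs are below) =====
def Claim_equal_describe_string : Prop := ∀ (string : String), Dom_describe_string string → Spec_describe_string string (describe_string string)

-- ===== LEMMAS AND PROOFS =====

-- the counting fold of A, characterised by B's two filters and the length
theorem describe_string_fold_eq (cs : List Char) (a b c : Int) :
    cs.foldl
      (fun (st : Int × Int × Int) ch =>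
        if PySem.Chars.isalpha ch then (st.1 + 1, st.2.1, st.2.2)
        else if PySem.Chars.isdigit ch then (st.1, st.2.1 + 1, st.2.2)
        else (st.1, st.2.1, st.2.2 + 1)) (a, b, c)
    = (a + ((cs.filter (fun ch => PySem.Chars.isalpha ch)).length : Int),
       b + ((cs.filter (fun ch => PySem.Chars.isdigit ch && !PySem.Chars.isalpha ch)).length : Int),
       c + (cs.length : Int)
         - ((cs.filter (fun ch => PySem.Chars.isalpha ch)).length : Int)
         - ((cs.filter (fun ch => PySem.Chars.isdigit ch && !PySem.Chars.isalpha ch)).length : Int)) := by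
  induction cs generalizing a b c with
  | nil => simp
  | cons ch rest ih =>
    by_cases h1 : PySem.Chars.isalpha ch
    · simp [List.foldl, h1, ih]; omega
    · by_cases h2 : PySem.Chars.isdigit ch
      · simp [List.foldl, h1, h2, ih]; omega
      · simp [List.foldl, h1, h2, ih]; omega

-- ===== VERDICT (by name: the statement is the Claim_ definition above) =====
theorem describe_string_spec : Claim_equal_describe_string := by
  intro s _
  show _ = _
  simp only [describe_string, describe_string_alt, describe_string_fold_eq,
    PySem.Str.len_eq, Int.zero_add]
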